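-- pv_equiv track=rewrite | github.com/anson-poon/leetcode-problems | NA_Island_Teasure.py | numIslandsWithTreasure
-- ===== SOURCE A (Python) =====
-- def numIslandsWithTreasure(grid):
--     if not grid:
--         return 0
--
--     rows, cols = len(grid), len(grid[0])
--     visited = set()
--
--     def dfs(r, c):
--         # If out of bounds or already visited or it's water, stop recursion
--         if r < 0 or r >= rows or c < 0 or c >= cols or (r, c) in visited or grid[r][c] == '0':
--             return False
--
--         # Mark current cell as visited
--         visited.add((r, c))
--
--         # Check if the current cell has treasure
--         has_treasure = (grid[r][c] == 'T')
--
--         # Explore the neighboring cells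
--         has_treasure = dfs(r - 1, c) or has_treasure  # up
--         has_treasure = dfs(r + 1, c) or has_treasure  # down
--         has_treasure = dfs(r, c - 1) or has_treasure  # left
--         has_treasure = dfs(r, c + 1) or has_treasure  # right
--
--         # # Alternative: Explore the neighboring cells with a loop
--         # for dr, dc in [(-1, 0), (1, 0), (0, -1), (0, 1)]:
--         #     has_treasure |= dfs(r + dr, c + dc)
--
--         return has_treasure
--
--     island_count = 0
--
--     for r in range(rows):
--         for c in range(cols):
--             if grid[r][c] in ['1', 'T'] and (r, c) not in visited:
--                 # Run DFS for each new island
--                 if dfs(r, c):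
--                     island_count += 1
--
--     return island_count
-- ===== SOURCE B (Python) =====
-- def numIslandsWithTreasure(grid):
--     if not grid:
--         return 0
--     rows, cols = len(grid), len(grid[0])
--
--     def land(r, c):
--         return 0 <= r < rows and 0 <= c < cols and grid[r][c] != '0'
--
--     def component(r0, c0):
--         # level-by-level flood fill, bounded by rows*cols rounds
--         comp = {(r0, c0)}
--         frontier = [(r0, c0)]
--         for _ in range(rows * cols):
--             nxt = []
--             for (x, y) in frontier:
--                 for (nx, ny) in ((x - 1, y), (x + 1, y), (x, y - 1), (x, y + 1)):
--                     if land(nx, ny) and (nx, ny) not in comp: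
--                         comp.add((nx, ny))
--                         nxt.append((nx, ny))
--             frontier = nxt
--         return comp
--
--     count = 0
--     for r in range(rows):
--         for c in range(cols):
--             if grid[r][c] == 'T' and all((x, y) >= (r, c)
--                                          for (x, y) in component(r, c)
--                                          if grid[x][y] == 'T'):
--                 count += 1
--     return count
-- ===== Notes on version B (the rewrite author's own statement) =====
-- stated objective: alternative
-- what changed: Replaces the shared-visited-set recursive DFS (count components whose DFS returns a treasure flag) by an independent per-treasure level-by-level flood fill that counts a treasure cell exactly when it is the row-major-first treasure of its connected component; no global visited set and no recursion.
import Mathlib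
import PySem

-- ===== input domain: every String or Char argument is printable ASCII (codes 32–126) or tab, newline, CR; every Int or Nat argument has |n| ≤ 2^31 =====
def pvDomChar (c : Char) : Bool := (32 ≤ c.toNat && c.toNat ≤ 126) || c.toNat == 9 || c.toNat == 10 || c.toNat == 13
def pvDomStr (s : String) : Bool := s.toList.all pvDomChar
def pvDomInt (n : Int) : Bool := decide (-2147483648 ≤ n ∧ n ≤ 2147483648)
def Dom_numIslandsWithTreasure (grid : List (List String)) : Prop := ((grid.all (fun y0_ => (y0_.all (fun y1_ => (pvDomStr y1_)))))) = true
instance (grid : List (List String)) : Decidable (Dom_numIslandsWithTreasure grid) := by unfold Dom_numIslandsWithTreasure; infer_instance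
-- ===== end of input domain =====

-- B replaces A's recursive DFS with a shared visited set (counting components whose DFS reports a
-- treasure) by an independent per-treasure bounded level-by-level flood fill that counts a treasure
-- cell exactly when it is the row-major-first treasure of its component (alternative, not faster).

-- ===== PORT A =====

-- grid[r][c] (both ports only evaluate it on indices that are in range under Pre_)
def pvGetCell (grid : List (List String)) (r c : Int) : String :=
  PySem.List.pyGetD (PySem.List.pyGetD grid r []) c ""

-- the recursive dfs of A; `fuel` is a totality guard only (A recurses on a strictly growing
-- visited set; fuel rows*cols+1 is proved sufficient below)
def pvDfsA (grid : List (List String)) (rows cols : Int) :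
    Nat → Int → Int → PySem.Set (Int × Int) → Bool × PySem.Set (Int × Int)
  | 0, _, _, vis => (false, vis)
  | fuel + 1, r, c, vis =>
    if r < 0 ∨ rows ≤ r ∨ c < 0 ∨ cols ≤ c ∨ (r, c) ∈ vis ∨ pvGetCell grid r c = "0" then
      (false, vis)
    else
      let vis1 := PySem.Set.add vis (r, c)
      let t0 : Bool := pvGetCell grid r c == "T"
      let p1 := pvDfsA grid rows cols fuel (r - 1) c vis1
      let h1 := p1.1 || t0
      let p2 := pvDfsA grid rows cols fuel (r + 1) c p1.2
      let h2 := p2.1 || h1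
      let p3 := pvDfsA grid rows cols fuel r (c - 1) p2.2
      let h3 := p3.1 || h2
      let p4 := pvDfsA grid rows cols fuel r (c + 1) p3.2
      (p4.1 || h3, p4.2)

def numIslandsWithTreasure (grid : List (List String)) : Int :=
  if grid = [] then 0
  else
    let rows : Int := grid.length
    let cols : Int := (grid.headD []).length
    let fuel : Nat := rows.toNat * cols.toNat + 1
    ((PySem.List.pyRange 0 rows 1).foldl (fun st r =>
      (PySem.List.pyRange 0 cols 1).foldl (fun st c =>
        if (pvGetCell grid r c = "1" ∨ pvGetCell grid r c = "T") ∧ (r, c) ∉ st.2 then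
          let p := pvDfsA grid rows cols fuel r c st.2
          (if p.1 then st.1 + 1 else st.1, p.2)
        else st) st) ((0 : Int), (PySem.Set.empty : PySem.Set (Int × Int)))).1

-- ===== PORT B =====

def pvLandB (grid : List (List String)) (rows cols r c : Int) : Bool :=
  decide (0 ≤ r ∧ r < rows ∧ 0 ≤ c ∧ c < cols ∧ pvGetCell grid r c ≠ "0")

def pvNbrs (xy : Int × Int) : List (Int × Int) :=
  [(xy.1 - 1, xy.2), (xy.1 + 1, xy.2), (xy.1, xy.2 - 1), (xy.1, xy.2 + 1)]

-- one candidate neighbour: add it to comp and to the next frontier if new land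
def pvVisit (grid : List (List String)) (rows cols : Int)
    (st : PySem.Set (Int × Int) × List (Int × Int)) (n : Int × Int) :
    PySem.Set (Int × Int) × List (Int × Int) :=
  if pvLandB grid rows cols n.1 n.2 ∧ n ∉ st.1 then (PySem.Set.add st.1 n, st.2 ++ [n]) else st

-- one level of the flood fill: expand every frontier cell
def pvRound (grid : List (List String)) (rows cols : Int)
    (st : PySem.Set (Int × Int) × List (Int × Int)) :
    PySem.Set (Int × Int) × List (Int × Int) :=
  st.2.foldl (fun s2 xy => (pvNbrs xy).foldl (pvVisit grid rows cols) s2) (st.1, [])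

def pvComponent (grid : List (List String)) (rows cols r0 c0 : Int) : PySem.Set (Int × Int) :=
  ((PySem.List.pyRange 0 (rows * cols) 1).foldl (fun st _ => pvRound grid rows cols st)
    (PySem.Set.ofList [(r0, c0)], [(r0, c0)])).1

def numIslandsWithTreasure_alt (grid : List (List String)) : Int :=
  if grid = [] then 0
  else
    let rows : Int := grid.length
    let cols : Int := (grid.headD []).length
    (PySem.List.pyRange 0 rows 1).foldl (fun cnt r =>
      (PySem.List.pyRange 0 cols 1).foldl (fun cnt c =>
        if pvGetCell grid r c = "T" ∧
            (∀ q ∈ pvComponent grid rows cols r c,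
              pvGetCell grid q.1 q.2 = "T" → (r < q.1 ∨ (r = q.1 ∧ c ≤ q.2))) then
          cnt + 1
        else cnt) cnt) 0

-- ===== PRECONDITION & SPEC =====

-- Pre_ excludes exactly the ragged grids on which A raises IndexError (a row shorter than
-- len(grid[0]) is indexed by the scan); A returns normally on every other input.
def Pre_numIslandsWithTreasure (grid : List (List String)) : Prop :=
  ∀ row ∈ grid, (grid.headD []).length ≤ row.length
instance (grid : List (List String)) : Decidable (Pre_numIslandsWithTreasure grid) := by
  unfold Pre_numIslandsWithTreasure; infer_instance

def pvWitness_numIslandsWithTreasure : List (List String) := [["T", "0"], ["1", "1"]]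

def Spec_numIslandsWithTreasure (grid : List (List String)) (out : Int) : Prop := out = numIslandsWithTreasure_alt grid
instance (grid : List (List String)) (out : Int) : Decidable (Spec_numIslandsWithTreasure grid out) := by unfold Spec_numIslandsWithTreasure; infer_instance

-- ===== CLAIM (what is proved, stated in full; the proofs are below) =====
def Claim_equal_numIslandsWithTreasure : Prop := ∀ (grid : List (List String)), Dom_numIslandsWithTreasure grid → Pre_numIslandsWithTreasure grid → Spec_numIslandsWithTreasure grid (numIslandsWithTreasure grid)

-- ===== LEMMAS AND PROOFS =====

-- shorthand for the grid geometry
def pvRowsI (g : List (List String)) : Int := g.length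
def pvColsI (g : List (List String)) : Int := (g.headD []).length

-- a land cell: in range and not water
def pvLandP (g : List (List String)) (p : Int × Int) : Prop :=
  0 ≤ p.1 ∧ p.1 < pvRowsI g ∧ 0 ≤ p.2 ∧ p.2 < pvColsI g ∧ pvGetCell g p.1 p.2 ≠ "0"

def pvAdj (p q : Int × Int) : Prop :=
  q = (p.1 - 1, p.2) ∨ q = (p.1 + 1, p.2) ∨ q = (p.1, p.2 - 1) ∨ q = (p.1, p.2 + 1)

def pvStep (g : List (List String)) (p q : Int × Int) : Prop := pvAdj p q ∧ pvLandP g q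

def pvConn (g : List (List String)) (p q : Int × Int) : Prop :=
  Relation.ReflTransGen (pvStep g) p q

-- all cells of the grid in row-major (scan) order
def pvCells (g : List (List String)) : List (Int × Int) :=
  (PySem.List.pyRange 0 (pvRowsI g) 1).flatMap
    (fun r => (PySem.List.pyRange 0 (pvColsI g) 1).map (fun c => (r, c)))

-- reachability avoiding a visited list V (what one dfs call explores)
def pvReach (g : List (List String)) (V : List (Int × Int)) (p q : Int × Int) : Prop :=
  pvLandP g p ∧ p ∉ V ∧
    Relation.ReflTransGen (fun a b => pvStep g a b ∧ b ∉ V) p q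

def pvLex (p q : Int × Int) : Prop := p.1 < q.1 ∨ (p.1 = q.1 ∧ p.2 < q.2)

def pvIsT (g : List (List String)) (p : Int × Int) : Bool := pvGetCell g p.1 p.2 == "T"
def pvIsStart (g : List (List String)) (p : Int × Int) : Bool :=
  (pvGetCell g p.1 p.2 == "1") || (pvGetCell g p.1 p.2 == "T")
def pvRelB (g : List (List String)) (q p : Int × Int) : Bool :=
  PySem.Set.contains (pvComponent g (pvRowsI g) (pvColsI g) q.1 q.2) p
def pvHasT (g : List (List String)) (q : Int × Int) : Bool :=
  (pvComponent g (pvRowsI g) (pvColsI g) q.1 q.2).any (fun x => pvIsT g x)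
def pvQ1 (g : List (List String)) (p : Int × Int) : Bool := pvIsStart g p && pvHasT g p
def pvC1 (g : List (List String)) (p : Int × Int) : Bool :=
  pvQ1 g p && ((pvCells g).find? (fun q => pvQ1 g q && pvRelB g q p) == some p)
def pvC2 (g : List (List String)) (p : Int × Int) : Bool :=
  pvIsT g p && ((pvCells g).find? (fun q => pvIsT g q && pvRelB g q p) == some p)

def pvNotVisCount (g : List (List String)) (V : List (Int × Int)) : Nat :=
  ((pvCells g).filter (fun q => decide (q ∉ V))).length

-- ---- basic geometry lemmas ----

theorem pv_mem_cells {g : List (List String)} {p : Int × Int} :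
    p ∈ pvCells g ↔ 0 ≤ p.1 ∧ p.1 < pvRowsI g ∧ 0 ≤ p.2 ∧ p.2 < pvColsI g := by
  cases p with | mk a b =>
  simp only [pvCells, List.mem_flatMap, List.mem_map, PySem.List.mem_pyRange_one]
  constructor
  · rintro ⟨r, ⟨h1, h2⟩, c, ⟨h3, h4⟩, h5⟩
    cases h5; exact ⟨h1, h2, h3, h4⟩
  · rintro ⟨h1, h2, h3, h4⟩
    exact ⟨a, ⟨h1, h2⟩, b, ⟨h3, h4⟩, rfl⟩

theorem pv_nodup_cells (g : List (List String)) : (pvCells g).Nodup := by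
  rw [pvCells, List.nodup_flatMap]
  constructor
  · intro a _
    exact (PySem.List.nodup_pyRange_one 0 (pvColsI g)).map
      (by intro b c h; simpa using congrArg Prod.snd h)
  · apply (PySem.List.pairwise_lt_pyRange_one 0 (pvRowsI g)).imp
    intro a b h x hx hy
    simp only [List.mem_map] at hx hy
    obtain ⟨c1, _, rfl⟩ := hx; obtain ⟨c2, _, h2⟩ := hy
    exact absurd (congrArg Prod.fst h2) (by simp; omega)

theorem pv_pairwise_cells (g : List (List String)) : (pvCells g).Pairwise pvLex := by
  rw [pvCells, List.pairwise_flatMap]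
  constructor
  · intro a _
    rw [List.pairwise_map]
    exact (PySem.List.pairwise_lt_pyRange_one 0 (pvColsI g)).imp
      (by intro b c h; right; exact ⟨rfl, h⟩)
  · apply (PySem.List.pairwise_lt_pyRange_one 0 (pvRowsI g)).imp
    intro a b h x hx y hy
    simp only [List.mem_map] at hx hy
    obtain ⟨c1, _, rfl⟩ := hx; obtain ⟨c2, _, rfl⟩ := hy
    left; exact h

theorem pv_length_cells (g : List (List String)) :
    (pvCells g).length = (pvRowsI g).toNat * (pvColsI g).toNat := by
  simp [pvCells, List.length_flatMap, PySem.List.length_pyRange_one]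

theorem pv_land_mem_cells {g : List (List String)} {p : Int × Int} (h : pvLandP g p) :
    p ∈ pvCells g := by
  exact pv_mem_cells.2 ⟨h.1, h.2.1, h.2.2.1, h.2.2.2.1⟩

-- ---- connectivity basics ----

theorem pv_adj_symm {p q : Int × Int} (h : pvAdj p q) : pvAdj q p := by
  obtain ⟨a,b⟩ := p; obtain ⟨c,d⟩ := q
  simp only [pvAdj, Prod.mk.injEq] at h ⊢
  omega

theorem pv_step_symm {g : List (List String)} {p q : Int × Int}
    (h : pvStep g p q) (hp : pvLandP g p) : pvStep g q p := by
  exact ⟨pv_adj_symm h.1, hp⟩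

theorem pv_land_of_conn {g : List (List String)} {p q : Int × Int}
    (hp : pvLandP g p) (h : pvConn g p q) : pvLandP g q := by
  induction h with
  | refl => exact hp
  | tail _ h2 _ => exact h2.2

theorem pv_conn_symm {g : List (List String)} {p q : Int × Int}
    (hp : pvLandP g p) (h : pvConn g p q) : pvConn g q p := by
  induction h with
  | refl => exact Relation.ReflTransGen.refl
  | @tail b c h1 h2 ih =>
      exact Relation.ReflTransGen.head (pv_step_symm h2 (pv_land_of_conn hp h1)) ih

theorem pv_adj_iff_mem_nbrs {p q : Int × Int} : pvAdj p q ↔ q ∈ pvNbrs p := by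
  simp [pvAdj, pvNbrs]

-- ---- pvReach lemmas ----

theorem pv_reach_self {g : List (List String)} {V : List (Int × Int)} {p : Int × Int}
    (hp : pvLandP g p) (hpv : p ∉ V) : pvReach g V p p := by
  exact ⟨hp, hpv, Relation.ReflTransGen.refl⟩

theorem pv_reach_land {g : List (List String)} {V : List (Int × Int)} {p q : Int × Int}
    (h : pvReach g V p q) : pvLandP g q ∧ q ∉ V := by
  obtain ⟨hp, hpv, rtg⟩ := h
  induction rtg with
  | refl => exact ⟨hp, hpv⟩
  | tail _ h2 _ => exact ⟨h2.1.2, h2.2⟩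

theorem pv_reach_snoc {g : List (List String)} {V : List (Int × Int)} {p q y : Int × Int}
    (h : pvReach g V p q) (hs : pvStep g q y) (hy : y ∉ V) : pvReach g V p y := by
  exact ⟨h.1, h.2.1, h.2.2.tail ⟨hs, hy⟩⟩

theorem pv_reach_trans {g : List (List String)} {V : List (Int × Int)} {p n q : Int × Int}
    (h1 : pvReach g V p n) (h2 : pvReach g V n q) : pvReach g V p q := by
  exact ⟨h1.1, h1.2.1, h1.2.2.trans h2.2.2⟩

theorem pv_reach_anti {g : List (List String)} {V W : List (Int × Int)} {p q : Int × Int}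
    (hVW : ∀ x ∈ V, x ∈ W) (h : pvReach g W p q) : pvReach g V p q := by
  refine ⟨h.1, fun hm => h.2.1 (hVW _ hm), ?_⟩
  exact Relation.ReflTransGen.mono (fun a b hab => ⟨hab.1, fun hb => hab.2 (hVW _ hb)⟩) h.2.2

theorem pv_reach_closed_sub {g : List (List String)} {V : List (Int × Int)}
    {S : (Int × Int) → Prop} {p : Int × Int}
    (hS : ∀ x y, S x → pvStep g x y → y ∉ V → S y) (hp : S p) :
    ∀ q, pvReach g V p q → S q := by
  rintro q ⟨hp', hpv', rtg⟩
  clear hp'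
  induction rtg with
  | refl => exact hp
  | tail _ h2 ih => exact hS _ _ ih h2.1 h2.2

-- on a visited set closed under steps, dfs reachability is plain connectivity
theorem pv_reach_closed_iff {g : List (List String)} {V : List (Int × Int)} {p q : Int × Int}
    (hcl : ∀ x y, x ∈ V → pvStep g x y → y ∈ V) (hpv : p ∉ V) :
    pvReach g V p q ↔ pvLandP g p ∧ pvConn g p q := by
  constructor
  · rintro ⟨hp, _, rtg⟩
    exact ⟨hp, Relation.ReflTransGen.mono (fun a b hab => hab.1) rtg⟩
  · rintro ⟨hL, hconn⟩
    refine ⟨hL, hpv, ?_⟩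
    suffices h : (Relation.ReflTransGen (fun a b => pvStep g a b ∧ b ∉ V) p q) ∧ q ∉ V from h.1
    induction hconn with
    | refl => exact ⟨Relation.ReflTransGen.refl, hpv⟩
    | @tail b c h1 h2 ih =>
        have hb : pvLandP g b := pv_land_of_conn hL h1
        have hcV : c ∉ V := fun hc => ih.2 (hcl _ _ hc (pv_step_symm h2 hb))
        exact ⟨ih.1.tail ⟨h2, hcV⟩, hcV⟩

-- ---- counting fuel helpers ----

theorem pv_cnt_le {g : List (List String)} {W W' : List (Int × Int)}
    (h : ∀ x ∈ W, x ∈ W') : pvNotVisCount g W' ≤ pvNotVisCount g W := by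
  unfold pvNotVisCount
  rw [← List.countP_eq_length_filter, ← List.countP_eq_length_filter]
  apply List.countP_mono_left
  intro x _ hx
  simp only [decide_eq_true_eq] at hx ⊢
  exact fun hxW => hx (h _ hxW)

theorem pv_cnt_lt {g : List (List String)} {W W' : List (Int × Int)} {p : Int × Int}
    (hp : p ∈ pvCells g) (hpW : p ∉ W) (h : ∀ x ∈ W, x ∈ W') (hpW' : p ∈ W') :
    pvNotVisCount g W' < pvNotVisCount g W := by
  unfold pvNotVisCount
  rw [← List.countP_eq_length_filter, ← List.countP_eq_length_filter]
  suffices H : ∀ L : List (Int × Int), p ∈ L →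
      List.countP (fun q => decide (q ∉ W')) L < List.countP (fun q => decide (q ∉ W)) L from
    H _ hp
  clear hp
  intro L hp
  induction L with
  | nil => cases hp
  | cons a l ih =>
      rw [List.countP_cons, List.countP_cons]
      rcases List.mem_cons.1 hp with rfl | hmem
      · have h1 : (fun q => decide (q ∉ W')) p = false := by simp [hpW']
        have h2 : (fun q => decide (q ∉ W)) p = true := by simp [hpW]
        simp only [h1, h2, Bool.false_eq_true, if_false, if_true]
        have := List.countP_mono_left (l := l)
          (p := fun q => decide (q ∉ W')) (q := fun q => decide (q ∉ W))
          (by intro x _ hx; simp only [decide_eq_true_eq] at hx ⊢; exact fun hxW => hx (h _ hxW))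
        omega
      · have := ih hmem
        by_cases ha : a ∈ W'
        · have e1 : (fun q => decide (q ∉ W')) a = false := by simp [ha]
          simp only [e1, Bool.false_eq_true, if_false]
          split <;> omega
        · have haW : a ∉ W := fun hw => ha (h _ hw)
          have e1 : (fun q => decide (q ∉ W')) a = true := by simp [ha]
          have e2 : (fun q => decide (q ∉ W)) a = true := by simp [haW]
          simp only [e1, e2, if_true]
          omega

theorem pv_cnt_le_total (g : List (List String)) (V : List (Int × Int)) :
    pvNotVisCount g V ≤ (pvRowsI g).toNat * (pvColsI g).toNat := by
  rw [← pv_length_cells]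
  exact List.length_filter_le _ _

-- ---- the dfs invariant (A side) ----

def pvInv (g : List (List String)) (V : List (Int × Int)) (P : Int × Int)
    (rem : List (Int × Int)) (W : List (Int × Int)) (B : Bool) : Prop :=
  (∀ x ∈ V, x ∈ W) ∧ P ∈ W ∧
  (∀ x ∈ W, x ∈ V ∨ pvReach g V P x) ∧
  (∀ x y, x ∈ W → x ∉ V → pvStep g x y → y ∉ W → x = P ∧ y ∈ rem) ∧
  (B = true ↔ ∃ x, x ∈ W ∧ x ∉ V ∧ pvIsT g x = true)

theorem pvInv_step {g : List (List String)} {V W W' : List (Int × Int)}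
    {P n : Int × Int} {rem : List (Int × Int)} {B b' : Bool}
    (hP : pvLandP g P) (hPV : P ∉ V) (hadj : pvAdj P n)
    (hW' : ∀ x, x ∈ W' ↔ x ∈ W ∨ pvReach g W n x)
    (hb' : b' = true ↔ ∃ x, pvReach g W n x ∧ pvIsT g x = true)
    (hinv : pvInv g V P (n :: rem) W B) :
    pvInv g V P rem W' (b' || B) := by
  obtain ⟨h1, h2, h3, h4, h5⟩ := hinv
  refine ⟨fun x hx => (hW' x).2 (Or.inl (h1 x hx)), (hW' P).2 (Or.inl h2), ?_, ?_, ?_⟩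
  · intro x hx
    rcases (hW' x).1 hx with hxW | hxR
    · exact h3 x hxW
    · right
      have hnW : n ∉ W := hxR.2.1
      have hnV : n ∉ V := fun hnv => hnW (h1 n hnv)
      have hPn : pvReach g V P n :=
        pv_reach_snoc (pv_reach_self hP hPV) ⟨hadj, hxR.1⟩ hnV
      exact pv_reach_trans hPn (pv_reach_anti h1 hxR)
  · intro x y hx hxV hs hy
    have hyW : y ∉ W := fun hyw => hy ((hW' y).2 (Or.inl hyw))
    rcases (hW' x).1 hx with hxW | hxR
    · obtain ⟨rfl, hmem⟩ := h4 x y hxW hxV hs hyW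
      refine ⟨rfl, ?_⟩
      rcases List.mem_cons.1 hmem with rfl | hr
      · exact absurd ((hW' y).2 (Or.inr (pv_reach_self hs.2 hyW))) hy
      · exact hr
    · exact absurd ((hW' y).2 (Or.inr (pv_reach_snoc hxR hs hyW))) hy
  · rw [Bool.or_eq_true, hb', h5]
    constructor
    · rintro (⟨x, hxR, hT⟩ | ⟨x, hxW, hxV, hT⟩)
      · have hl := pv_reach_land hxR
        exact ⟨x, (hW' x).2 (Or.inr hxR), fun hv => hl.2 (h1 _ hv), hT⟩
      · exact ⟨x, (hW' x).2 (Or.inl hxW), hxV, hT⟩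
    · rintro ⟨x, hxW', hxV, hT⟩
      rcases (hW' x).1 hxW' with hxW | hxR
      · exact Or.inr ⟨x, hxW, hxV, hT⟩
      · exact Or.inl ⟨x, hxR, hT⟩

theorem pvInv_final {g : List (List String)} {V W : List (Int × Int)} {P : Int × Int} {B : Bool}
    (hPV : P ∉ V) (hinv : pvInv g V P [] W B) :
    (∀ x, x ∈ W ↔ x ∈ V ∨ pvReach g V P x) ∧
    (B = true ↔ ∃ x, pvReach g V P x ∧ pvIsT g x = true) := by
  obtain ⟨h1, h2, h3, h4, h5⟩ := hinv
  have hmem : ∀ x, x ∈ W ↔ x ∈ V ∨ pvReach g V P x := by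
    intro x
    constructor
    · exact h3 x
    · rintro (hv | hr)
      · exact h1 x hv
      · have := pv_reach_closed_sub (S := fun z => z ∈ W ∧ z ∉ V)
          (fun a b ha hs hb => ⟨by
            by_contra hbW
            simpa using (h4 a b ha.1 ha.2 hs hbW).2, hb⟩) ⟨h2, hPV⟩ x hr
        exact this.1
  refine ⟨hmem, ?_⟩
  rw [h5]
  constructor
  · rintro ⟨x, hxW, hxV, hT⟩
    rcases h3 x hxW with hv | hr
    · exact absurd hv hxV
    · exact ⟨x, hr, hT⟩
  · rintro ⟨x, hr, hT⟩
    exact ⟨x, (hmem x).2 (Or.inr hr), (pv_reach_land hr).2, hT⟩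

-- the main dfs specification
theorem pvDfsA_spec (g : List (List String)) :
    ∀ (fuel : Nat) (r c : Int) (V : PySem.Set (Int × Int)),
      pvNotVisCount g V < fuel →
      (∀ x, x ∈ (pvDfsA g (pvRowsI g) (pvColsI g) fuel r c V).2 ↔
        x ∈ V ∨ pvReach g V (r, c) x) ∧
      ((pvDfsA g (pvRowsI g) (pvColsI g) fuel r c V).1 = true ↔
        ∃ x, pvReach g V (r, c) x ∧ pvIsT g x = true) := by
  intro fuel
  induction fuel with
  | zero => intro r c V h; exact absurd h (Nat.not_lt_zero _)
  | succ fuel ih =>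
    intro r c V hfuel
    by_cases hguard : r < 0 ∨ pvRowsI g ≤ r ∨ c < 0 ∨ pvColsI g ≤ c ∨ (r, c) ∈ V ∨
        pvGetCell g r c = "0"
    · have hempty : ∀ x, ¬ pvReach g V (r, c) x := by
        rintro x ⟨hland, hnv, -⟩
        simp only [pvLandP] at hland
        obtain ⟨a1, a2, a3, a4, a5⟩ := hland
        rcases hguard with h | h | h | h | h | h
        · omega
        · omega
        · omega
        · omega
        · exact hnv h
        · exact a5 h
      rw [pvDfsA, if_pos hguard]
      refine ⟨fun x => ⟨Or.inl, ?_⟩, ⟨fun h => absurd h (by simp), ?_⟩⟩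
      · rintro (hx | hx)
        · exact hx
        · exact absurd hx (hempty x)
      · rintro ⟨x, hx, -⟩
        exact absurd hx (hempty x)
    · rw [pvDfsA, if_neg hguard]
      push_neg at hguard
      obtain ⟨hr0, hrR, hc0, hcC, hVmem, hwater⟩ := hguard
      have hLand : pvLandP g (r, c) := ⟨by simpa using hr0, by simpa using hrR,
        by simpa using hc0, by simpa using hcC, by simpa using hwater⟩
      have hPmem : (r, c) ∈ pvCells g := pv_land_mem_cells hLand
      have hVW0 : ∀ x ∈ V, x ∈ PySem.Set.add V (r, c) := by
        intro x hx; rw [PySem.Set.mem_add]; exact Or.inl hx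
      have hPW0 : (r, c) ∈ PySem.Set.add V (r, c) := by
        rw [PySem.Set.mem_add]; exact Or.inr rfl
      have hcnt0 : pvNotVisCount g (PySem.Set.add V (r, c)) < fuel := by
        have h1 := pv_cnt_lt hPmem hVmem hVW0 hPW0
        omega
      have hinv0 : pvInv g V (r, c) (pvNbrs (r, c)) (PySem.Set.add V (r, c))
          (pvGetCell g r c == "T") := by
        refine ⟨hVW0, hPW0, ?_, ?_, ?_⟩
        · intro x hx
          rcases (PySem.Set.mem_add _ _ _).1 hx with h | rfl
          · exact Or.inl h
          · exact Or.inr (pv_reach_self hLand hVmem)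
        · intro x y hx hxV hs hy
          rcases (PySem.Set.mem_add _ _ _).1 hx with h | rfl
          · exact absurd h hxV
          · exact ⟨rfl, pv_adj_iff_mem_nbrs.1 hs.1⟩
        · constructor
          · intro hT
            exact ⟨(r, c), hPW0, hVmem, by simpa [pvIsT] using hT⟩
          · rintro ⟨x, hx, hxV, hT⟩
            rcases (PySem.Set.mem_add _ _ _).1 hx with h | rfl
            · exact absurd h hxV
            · simpa [pvIsT] using hT
      -- call 1 (up)
      have e1 := ih (r - 1) c (PySem.Set.add V (r, c)) hcnt0
      have inv1 := pvInv_step hLand hVmem (by left; rfl) e1.1 e1.2 hinv0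
      have hsub1 : ∀ x ∈ PySem.Set.add V (r, c),
          x ∈ (pvDfsA g (pvRowsI g) (pvColsI g) fuel (r - 1) c (PySem.Set.add V (r, c))).2 :=
        fun x hx => (e1.1 x).2 (Or.inl hx)
      have hcnt1 : pvNotVisCount g
          (pvDfsA g (pvRowsI g) (pvColsI g) fuel (r - 1) c (PySem.Set.add V (r, c))).2 < fuel :=
        lt_of_le_of_lt (pv_cnt_le hsub1) hcnt0
      -- call 2 (down)
      have e2 := ih (r + 1) c _ hcnt1
      have inv2 := pvInv_step hLand hVmem (by right; left; rfl) e2.1 e2.2 inv1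
      have hsub2 : ∀ x ∈ (pvDfsA g (pvRowsI g) (pvColsI g) fuel (r - 1) c (PySem.Set.add V (r, c))).2,
          x ∈ (pvDfsA g (pvRowsI g) (pvColsI g) fuel (r + 1) c
            (pvDfsA g (pvRowsI g) (pvColsI g) fuel (r - 1) c (PySem.Set.add V (r, c))).2).2 :=
        fun x hx => (e2.1 x).2 (Or.inl hx)
      have hcnt2 := lt_of_le_of_lt (pv_cnt_le hsub2) hcnt1
      -- call 3 (left)
      have e3 := ih r (c - 1) _ hcnt2
      have inv3 := pvInv_step hLand hVmem (by right; right; left; rfl) e3.1 e3.2 inv2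
      have hsub3 : ∀ x ∈ (pvDfsA g (pvRowsI g) (pvColsI g) fuel (r + 1) c
            (pvDfsA g (pvRowsI g) (pvColsI g) fuel (r - 1) c (PySem.Set.add V (r, c))).2).2,
          x ∈ (pvDfsA g (pvRowsI g) (pvColsI g) fuel r (c - 1)
            (pvDfsA g (pvRowsI g) (pvColsI g) fuel (r + 1) c
              (pvDfsA g (pvRowsI g) (pvColsI g) fuel (r - 1) c (PySem.Set.add V (r, c))).2).2).2 :=
        fun x hx => (e3.1 x).2 (Or.inl hx)
      have hcnt3 := lt_of_le_of_lt (pv_cnt_le hsub3) hcnt2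
      -- call 4 (right)
      have e4 := ih r (c + 1) _ hcnt3
      have inv4 := pvInv_step hLand hVmem (by right; right; right; rfl) e4.1 e4.2 inv3
      have fin := pvInv_final hVmem inv4
      exact fin

-- ---- B-side flood fill correctness ----

theorem pv_landB_iff {g : List (List String)} {p : Int × Int} :
    pvLandB g (pvRowsI g) (pvColsI g) p.1 p.2 = true ↔ pvLandP g p := by
  rw [pvLandB, pvLandP, decide_eq_true_eq]

theorem pvVisit_fold (g : List (List String)) :
    ∀ (ns : List (Int × Int)) (C N : List (Int × Int)),
    ∃ M, ns.foldl (pvVisit g (pvRowsI g) (pvColsI g)) (C, N) = (C ++ M, N ++ M) ∧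
      (∀ x ∈ M, pvLandP g x ∧ x ∈ ns ∧ x ∉ C) ∧ M.Nodup ∧
      (∀ x ∈ ns, pvLandP g x → x ∈ C ++ M) := by
  intro ns
  induction ns with
  | nil => exact fun C N => ⟨[], by simp⟩
  | cons n t ih =>
      intro C N
      rw [List.foldl_cons]
      by_cases hg : pvLandB g (pvRowsI g) (pvColsI g) n.1 n.2 ∧ n ∉ C
      · have hstep : pvVisit g (pvRowsI g) (pvColsI g) (C, N) n = (C ++ [n], N ++ [n]) := by
          rw [pvVisit, if_pos hg, PySem.Set.add_of_not_mem hg.2]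
        rw [hstep]
        obtain ⟨M', hM'eq, hM'prop, hM'nd, hM'all⟩ := ih (C ++ [n]) (N ++ [n])
        refine ⟨n :: M', by rw [hM'eq]; simp, ?_, ?_, ?_⟩
        · intro x hx
          rcases List.mem_cons.1 hx with rfl | hx
          · exact ⟨pv_landB_iff.1 hg.1, List.mem_cons_self, hg.2⟩
          · obtain ⟨hl, hm, hnc⟩ := hM'prop x hx
            exact ⟨hl, List.mem_cons_of_mem _ hm, fun hc => hnc (List.mem_append_left _ hc)⟩
        · refine List.nodup_cons.2 ⟨?_, hM'nd⟩
          intro hn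
          exact (hM'prop n hn).2.2 (List.mem_append_right _ List.mem_cons_self)
        · intro x hx hl
          rcases List.mem_cons.1 hx with rfl | hx
          · simp
          · have := hM'all x hx hl
            simpa using this
      · have hstep : pvVisit g (pvRowsI g) (pvColsI g) (C, N) n = (C, N) := by
          rw [pvVisit, if_neg hg]
        rw [hstep]
        obtain ⟨M, hMeq, hMprop, hMnd, hMall⟩ := ih C N
        refine ⟨M, hMeq, ?_, hMnd, ?_⟩
        · intro x hx
          obtain ⟨hl, hm, hnc⟩ := hMprop x hx
          exact ⟨hl, List.mem_cons_of_mem _ hm, hnc⟩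
        · intro x hx hl
          rcases List.mem_cons.1 hx with rfl | hx
          · rcases not_and_or.1 hg with hb | hb
            · exact absurd (pv_landB_iff.2 hl) hb
            · exact List.mem_append_left _ (not_not.1 hb)
          · exact hMall x hx hl

theorem pvRound_fold (g : List (List String)) :
    ∀ (F C N : List (Int × Int)),
    ∃ M, F.foldl (fun s2 xy => (pvNbrs xy).foldl (pvVisit g (pvRowsI g) (pvColsI g)) s2) (C, N)
        = (C ++ M, N ++ M) ∧
      (∀ x ∈ M, pvLandP g x ∧ (∃ y ∈ F, pvAdj y x) ∧ x ∉ C) ∧ M.Nodup ∧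
      (∀ y ∈ F, ∀ x, pvStep g y x → x ∈ C ++ M) := by
  intro F
  induction F with
  | nil => exact fun C N => ⟨[], by simp⟩
  | cons y t ih =>
      intro C N
      rw [List.foldl_cons]
      obtain ⟨M1, hM1eq, hM1prop, hM1nd, hM1all⟩ := pvVisit_fold g (pvNbrs y) C N
      rw [hM1eq]
      obtain ⟨M2, hM2eq, hM2prop, hM2nd, hM2all⟩ := ih (C ++ M1) (N ++ M1)
      refine ⟨M1 ++ M2, by rw [hM2eq]; simp, ?_, ?_, ?_⟩
      · intro x hx
        rcases List.mem_append.1 hx with hx | hx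
        · obtain ⟨hl, hm, hnc⟩ := hM1prop x hx
          exact ⟨hl, ⟨y, List.mem_cons_self, pv_adj_iff_mem_nbrs.2 hm⟩, hnc⟩
        · obtain ⟨hl, ⟨y', hy', hadj⟩, hnc⟩ := hM2prop x hx
          exact ⟨hl, ⟨y', List.mem_cons_of_mem _ hy', hadj⟩,
            fun hc => hnc (List.mem_append_left _ hc)⟩
      · refine List.Nodup.append hM1nd hM2nd ?_
        intro x hx1 hx2
        exact (hM2prop x hx2).2.2 (List.mem_append_right _ hx1)
      · intro y' hy' x hs
        rcases List.mem_cons.1 hy' with rfl | hy'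
        · have hx1 : x ∈ C ++ M1 := hM1all x (pv_adj_iff_mem_nbrs.1 hs.1) hs.2
          rcases List.mem_append.1 hx1 with h | h
          · exact List.mem_append_left _ h
          · exact List.mem_append_right _ (List.mem_append_left _ h)
        · have := hM2all y' hy' x hs
          simpa using this

def pvGood (g : List (List String)) (p0 : Int × Int) (C F : List (Int × Int)) : Prop :=
  p0 ∈ C ∧ (∀ x ∈ C, pvConn g p0 x) ∧
  (∀ x ∈ C, x ∉ F → ∀ y, pvStep g x y → y ∈ C) ∧
  (∀ x ∈ F, x ∈ C) ∧ C.Nodup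

theorem pvRound_good {g : List (List String)} {p0 : Int × Int} {C F : List (Int × Int)}
    (hg : pvGood g p0 C F) :
    pvGood g p0 (pvRound g (pvRowsI g) (pvColsI g) (C, F)).1
      (pvRound g (pvRowsI g) (pvColsI g) (C, F)).2 ∧
    ((pvRound g (pvRowsI g) (pvColsI g) (C, F)).2 = [] ∨
      C.length < (pvRound g (pvRowsI g) (pvColsI g) (C, F)).1.length) ∧
    (∀ x ∈ C, x ∈ (pvRound g (pvRowsI g) (pvColsI g) (C, F)).1) := by
  obtain ⟨hmem, hconn, hcl, hFC, hnd⟩ := hg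
  obtain ⟨M, hMeq, hMprop, hMnd, hMall⟩ := pvRound_fold g F C []
  have hre : pvRound g (pvRowsI g) (pvColsI g) (C, F) = (C ++ M, M) := by
    rw [pvRound]; rw [hMeq]; simp
  rw [hre]
  have hdisj : ∀ x ∈ M, x ∉ C := fun x hx => (hMprop x hx).2.2
  refine ⟨⟨List.mem_append_left _ hmem, ?_, ?_, fun x hx => List.mem_append_right _ hx,
      List.Nodup.append hnd hMnd (fun x hx1 hx2 => hdisj x hx2 hx1)⟩, ?_, ?_⟩
  · intro x hx
    rcases List.mem_append.1 hx with hx | hx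
    · exact hconn x hx
    · obtain ⟨hl, ⟨y, hyF, hadj⟩, -⟩ := hMprop x hx
      exact (hconn y (hFC y hyF)).tail ⟨hadj, hl⟩
  · intro x hx hxM y hs
    rcases List.mem_append.1 hx with hxC | hxM'
    · by_cases hxF : x ∈ F
      · exact hMall x hxF y hs
      · exact List.mem_append_left _ (hcl x hxC hxF y hs)
    · exact absurd hxM' hxM
  · cases M with
    | nil => exact Or.inl rfl
    | cons m t => right; simp
  · exact fun x hx => List.mem_append_left _ hx

theorem pvComponent_spec {g : List (List String)} {p0 : Int × Int} (hp0 : pvLandP g p0) :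
    ∀ q, q ∈ pvComponent g (pvRowsI g) (pvColsI g) p0.1 p0.2 ↔ pvConn g p0 q := by
  obtain ⟨r0, c0⟩ := p0
  intro q
  have hiter : ∀ (l : List Int) (st : PySem.Set (Int × Int) × List (Int × Int)),
      l.foldl (fun st _ => pvRound g (pvRowsI g) (pvColsI g) st) st =
        (fun st => pvRound g (pvRowsI g) (pvColsI g) st)^[l.length] st := by
    intro l
    induction l with
    | nil => intro st; rfl
    | cons a t ih =>
        intro st
        rw [List.foldl_cons, List.length_cons, Function.iterate_succ_apply]
        exact ih _
  have hstart : pvGood g (r0, c0) [(r0, c0)] [(r0, c0)] := by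
    refine ⟨List.mem_cons_self, ?_, ?_, fun x hx => hx, List.nodup_singleton _⟩
    · intro x hx
      rcases List.mem_cons.1 hx with rfl | hx
      · exact Relation.ReflTransGen.refl
      · cases hx
    · intro x hx hxF
      exact absurd hx hxF
  have hk : ∀ k : Nat,
      pvGood g (r0, c0)
        ((fun st => pvRound g (pvRowsI g) (pvColsI g) st)^[k] ([(r0, c0)], [(r0, c0)])).1
        ((fun st => pvRound g (pvRowsI g) (pvColsI g) st)^[k] ([(r0, c0)], [(r0, c0)])).2 ∧
      (((fun st => pvRound g (pvRowsI g) (pvColsI g) st)^[k] ([(r0, c0)], [(r0, c0)])).2 = [] ∨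
        k + 1 ≤ ((fun st => pvRound g (pvRowsI g) (pvColsI g) st)^[k] ([(r0, c0)], [(r0, c0)])).1.length) := by
    intro k
    induction k with
    | zero => exact ⟨hstart, Or.inr (by simp)⟩
    | succ k ih =>
        obtain ⟨hgood, hsize⟩ := ih
        rw [Function.iterate_succ_apply']
        set st := (fun st => pvRound g (pvRowsI g) (pvColsI g) st)^[k] ([(r0, c0)], [(r0, c0)]) with hst
        obtain ⟨hgood', hgrow, hsub⟩ :=
          pvRound_good (C := st.1) (F := st.2) hgood
        rw [Prod.mk.eta] at hgood' hgrow hsub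
        refine ⟨hgood', ?_⟩
        rcases hgrow with hF | hlen2
        · exact Or.inl hF
        · rcases hsize with hF | hlen
          · left
            have hfix : pvRound g (pvRowsI g) (pvColsI g) st = st := by
              conv_lhs => rw [← Prod.mk.eta (p := st)]
              rw [pvRound, hF]
              simp
              rw [← hF, Prod.mk.eta]
            rw [hfix]
            exact hF
          · right
            omega
  -- every comp list stays inside the grid cells
  have hbound : ∀ k,
      (((fun st => pvRound g (pvRowsI g) (pvColsI g) st)^[k] ([(r0, c0)], [(r0, c0)])).1).length ≤
        (pvCells g).length := by
    intro k
    obtain ⟨⟨-, hconn, -, -, hnd⟩, -⟩ := hk k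
    refine List.Subperm.length_le (List.subperm_of_subset hnd ?_)
    intro x hx
    exact pv_land_mem_cells (pv_land_of_conn hp0 (hconn x hx))
  -- the number of iterations equals the number of cells
  have hKlen : (PySem.List.pyRange 0 (pvRowsI g * pvColsI g) 1).length = (pvCells g).length := by
    rw [PySem.List.length_pyRange_one, pv_length_cells, pvRowsI, pvColsI]
    rw [show ((g.length : Int) * ((g.headD []).length : Int) - 0) = ((g.length * (g.headD []).length : Nat) : Int) by push_cast; ring]
    exact Int.toNat_natCast _
  set K := (PySem.List.pyRange 0 (pvRowsI g * pvColsI g) 1).length with hKdef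
  obtain ⟨⟨hmem, hconn, hcl, -, -⟩, hend⟩ := hk K
  have hFnil : ((fun st => pvRound g (pvRowsI g) (pvColsI g) st)^[K] ([(r0, c0)], [(r0, c0)])).2 = [] := by
    rcases hend with h | h
    · exact h
    · exfalso
      have := hbound K
      omega
  have hcomp : pvComponent g (pvRowsI g) (pvColsI g) (r0, c0).1 (r0, c0).2 =
      ((fun st => pvRound g (pvRowsI g) (pvColsI g) st)^[K] ([(r0, c0)], [(r0, c0)])).1 := by
    rw [pvComponent]
    rw [hiter]
    rfl
  rw [hcomp]
  constructor
  · exact fun h => hconn q h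
  · intro h
    induction h with
    | refl => exact hmem
    | @tail b c h1 h2 ih =>
        exact hcl b ih (by rw [hFnil]; exact List.not_mem_nil) c h2

theorem pv_relB_iff {g : List (List String)} {q p : Int × Int} (hq : pvLandP g q) :
    pvRelB g q p = true ↔ pvConn g q p := by
  rw [pvRelB]
  rw [PySem.Set.contains_iff]
  exact pvComponent_spec hq p

-- ---- generic list-order helpers ----

theorem pv_find?_congr {α : Type} {l : List α} {p q : α → Bool}
    (h : ∀ x ∈ l, p x = q x) : l.find? p = l.find? q := by
  induction l with
  | nil => rfl
  | cons a t ih =>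
      rw [List.find?_cons, List.find?_cons, h a List.mem_cons_self]
      cases hqa : q a with
      | true => rfl
      | false => exact ih (fun x hx => h x (List.mem_cons_of_mem a hx))

theorem pv_find?_first {α : Type} {lt : α → α → Prop} {l : List α} {p : α}
    (hasymm : ∀ a b, lt a b → ¬ lt b a)
    (hpair : l.Pairwise lt) (hp : p ∈ l) (f : α → Bool) (hfp : f p = true) :
    (l.find? f = some p ↔ ∀ q ∈ l, lt q p → f q = false) := by
  induction l with
  | nil => cases hp
  | cons a t ih =>
      obtain ⟨ha, hpt⟩ := List.pairwise_cons.1 hpair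
      rcases List.mem_cons.1 hp with rfl | hpmem
      · rw [List.find?_cons_of_pos hfp]
        constructor
        · intro _ q hq hlt
          rcases List.mem_cons.1 hq with rfl | hqt
          · exact absurd hlt (hasymm _ _ hlt)
          · exact absurd hlt (hasymm _ _ (ha q hqt))
        · intro _; rfl
      · have hap : lt a p := ha p hpmem
        cases hfa : f a with
        | true =>
            rw [List.find?_cons_of_pos hfa]
            simp only [Option.some.injEq]
            constructor
            · rintro rfl; exact absurd hap (hasymm _ _ hap)
            · intro hall
              exact absurd (hall a List.mem_cons_self hap) (by simp [hfa])
        | false =>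
            rw [List.find?_cons_of_neg (by simp [hfa]), ih hpt hpmem]
            constructor
            · intro hall q hq hlt
              rcases List.mem_cons.1 hq with rfl | hqt
              · exact hfa
              · exact hall q hqt hlt
            · intro hall q hq hlt
              exact hall q (List.mem_cons_of_mem a hq) hlt

theorem pv_mem_pre_iff {α : Type} {lt : α → α → Prop} {pre suf : List α} {p q : α}
    (hpair : (pre ++ p :: suf).Pairwise lt)
    (hasymm : ∀ a b, lt a b → ¬ lt b a) :
    (q ∈ pre ↔ q ∈ pre ++ p :: suf ∧ lt q p) := by
  rw [List.pairwise_append] at hpair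
  obtain ⟨hpre, hcons, hcross⟩ := hpair
  constructor
  · intro hq
    exact ⟨List.mem_append_left _ hq, hcross q hq p List.mem_cons_self⟩
  · rintro ⟨hq, hlt⟩
    rcases List.mem_append.1 hq with h | h
    · exact h
    · rcases List.mem_cons.1 h with rfl | h
      · exact absurd hlt (hasymm _ _ hlt)
      · exact absurd hlt (hasymm _ _ ((List.pairwise_cons.1 hcons).1 q h))

-- ---- the counting bijection ----

theorem pv_isT_land {g : List (List String)} {p : Int × Int}
    (hp : p ∈ pvCells g) (hT : pvIsT g p = true) : pvLandP g p := by
  obtain ⟨h1, h2, h3, h4⟩ := pv_mem_cells.1 hp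
  refine ⟨h1, h2, h3, h4, ?_⟩
  rw [pvIsT, beq_iff_eq] at hT
  rw [hT]
  decide

theorem pv_isStart_land {g : List (List String)} {p : Int × Int}
    (hp : p ∈ pvCells g) (hS : pvIsStart g p = true) : pvLandP g p := by
  obtain ⟨h1, h2, h3, h4⟩ := pv_mem_cells.1 hp
  refine ⟨h1, h2, h3, h4, ?_⟩
  rw [pvIsStart, Bool.or_eq_true, beq_iff_eq, beq_iff_eq] at hS
  rcases hS with h | h <;> rw [h] <;> decide

theorem pv_isT_isStart {g : List (List String)} {p : Int × Int}
    (hT : pvIsT g p = true) : pvIsStart g p = true := by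
  rw [pvIsStart, Bool.or_eq_true]
  exact Or.inr hT

theorem pv_relB_self {g : List (List String)} {p : Int × Int} (hp : pvLandP g p) :
    pvRelB g p p = true := by
  rw [pv_relB_iff hp]
  exact Relation.ReflTransGen.refl

theorem pv_hasT_iff {g : List (List String)} {p : Int × Int} (hp : pvLandP g p) :
    pvHasT g p = true ↔ ∃ x, pvConn g p x ∧ pvIsT g x = true := by
  rw [pvHasT, List.any_eq_true]
  constructor
  · rintro ⟨x, hx, hT⟩
    exact ⟨x, (pvComponent_spec hp x).1 hx, hT⟩
  · rintro ⟨x, hx, hT⟩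
    exact ⟨x, (pvComponent_spec hp x).2 hx, hT⟩

theorem pv_find_class_congr {g : List (List String)} {Q : (Int × Int) → Bool}
    (hQland : ∀ q ∈ pvCells g, Q q = true → pvLandP g q)
    {a p : Int × Int} (hLa : pvLandP g a) (hconn : pvConn g a p) :
    (pvCells g).find? (fun q => Q q && pvRelB g q p) =
      (pvCells g).find? (fun q => Q q && pvRelB g q a) := by
  apply pv_find?_congr
  intro x hx
  cases hQ : Q x with
  | false => simp [hQ]
  | true =>
      simp only [Bool.true_and]
      have hLx := hQland x hx hQ
      rw [Bool.eq_iff_iff, pv_relB_iff hLx, pv_relB_iff hLx]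
      constructor
      · exact fun h => h.trans (pv_conn_symm hLa hconn)
      · exact fun h => h.trans hconn

-- the two "first representative" systems pick one cell per treasure component
theorem pv_wit2 {g : List (List String)} {p : Int × Int}
    (hp : p ∈ pvCells g) (hQ1 : pvQ1 g p = true) :
    ∃ a, (pvCells g).find? (fun q => pvIsT g q && pvRelB g q p) = some a ∧
      pvC2 g a = true ∧ pvConn g a p ∧ a ∈ pvCells g := by
  rw [pvQ1, Bool.and_eq_true] at hQ1
  have hLp := pv_isStart_land hp hQ1.1
  obtain ⟨x, hconnx, hTx⟩ := (pv_hasT_iff hLp).1 hQ1.2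
  have hLx := pv_land_of_conn hLp hconnx
  have hxcells := pv_land_mem_cells hLx
  have hsome : ((pvCells g).find? (fun q => pvIsT g q && pvRelB g q p)).isSome = true := by
    rw [List.find?_isSome]
    refine ⟨x, hxcells, ?_⟩
    rw [Bool.and_eq_true, pv_relB_iff hLx]
    exact ⟨hTx, pv_conn_symm hLp hconnx⟩
  obtain ⟨a, ha⟩ := Option.isSome_iff_exists.1 hsome
  have hamem := List.mem_of_find?_eq_some ha
  have hpred := List.find?_some ha
  rw [Bool.and_eq_true] at hpred
  have hLa := pv_isT_land hamem hpred.1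
  have hconna : pvConn g a p := (pv_relB_iff hLa).1 hpred.2
  refine ⟨a, ha, ?_, hconna, hamem⟩
  rw [pvC2, Bool.and_eq_true]
  refine ⟨hpred.1, ?_⟩
  rw [beq_iff_eq, ← pv_find_class_congr (fun q hq => pv_isT_land hq) hLa hconna, ha]

theorem pv_wit1 {g : List (List String)} {p : Int × Int}
    (hp : p ∈ pvCells g) (hT : pvIsT g p = true) :
    ∃ a, (pvCells g).find? (fun q => pvQ1 g q && pvRelB g q p) = some a ∧
      pvC1 g a = true ∧ pvConn g a p ∧ a ∈ pvCells g := by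
  have hLp := pv_isT_land hp hT
  have hQ1p : pvQ1 g p = true := by
    rw [pvQ1, Bool.and_eq_true]
    exact ⟨pv_isT_isStart hT, (pv_hasT_iff hLp).2 ⟨p, Relation.ReflTransGen.refl, hT⟩⟩
  have hsome : ((pvCells g).find? (fun q => pvQ1 g q && pvRelB g q p)).isSome = true := by
    rw [List.find?_isSome]
    exact ⟨p, hp, by rw [Bool.and_eq_true]; exact ⟨hQ1p, pv_relB_self hLp⟩⟩
  obtain ⟨a, ha⟩ := Option.isSome_iff_exists.1 hsome
  have hamem := List.mem_of_find?_eq_some ha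
  have hpred := List.find?_some ha
  rw [Bool.and_eq_true] at hpred
  have hLa := pv_isStart_land hamem (by
    have := hpred.1
    rw [pvQ1, Bool.and_eq_true] at this
    exact this.1)
  have hconna : pvConn g a p := (pv_relB_iff hLa).1 hpred.2
  refine ⟨a, ha, ?_, hconna, hamem⟩
  rw [pvC1, Bool.and_eq_true]
  refine ⟨hpred.1, ?_⟩
  rw [beq_iff_eq, ← pv_find_class_congr (fun q hq hQ => pv_isStart_land hq (by
    rw [pvQ1, Bool.and_eq_true] at hQ; exact hQ.1)) hLa hconna, ha]

theorem pv_countP_bij {g : List (List String)} :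
    ((pvCells g).countP (pvC1 g)) = ((pvCells g).countP (pvC2 g)) := by
  classical
  rw [List.countP_eq_length_filter, List.countP_eq_length_filter]
  have hnd1 : ((pvCells g).filter (pvC1 g)).Nodup := (pv_nodup_cells g).filter _
  have hnd2 : ((pvCells g).filter (pvC2 g)).Nodup := (pv_nodup_cells g).filter _
  rw [← List.toFinset_card_of_nodup hnd1, ← List.toFinset_card_of_nodup hnd2]
  have hmem1 : ∀ {p}, p ∈ ((pvCells g).filter (pvC1 g)).toFinset ↔
      p ∈ pvCells g ∧ pvC1 g p = true := by
    intro p; rw [List.mem_toFinset, List.mem_filter]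
  have hmem2 : ∀ {p}, p ∈ ((pvCells g).filter (pvC2 g)).toFinset ↔
      p ∈ pvCells g ∧ pvC2 g p = true := by
    intro p; rw [List.mem_toFinset, List.mem_filter]
  have hQ1land : ∀ q ∈ pvCells g, pvQ1 g q = true → pvLandP g q := by
    intro q hq hQ
    rw [pvQ1, Bool.and_eq_true] at hQ
    exact pv_isStart_land hq hQ.1
  have hTland : ∀ q ∈ pvCells g, pvIsT g q = true → pvLandP g q :=
    fun q hq hT => pv_isT_land hq hT
  apply Finset.card_bij'
    (i := fun p _ => ((pvCells g).find? (fun q => pvIsT g q && pvRelB g q p)).getD p)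
    (j := fun p _ => ((pvCells g).find? (fun q => pvQ1 g q && pvRelB g q p)).getD p)
  · intro p hp
    obtain ⟨hpc, hc1⟩ := hmem1.1 hp
    rw [pvC1, Bool.and_eq_true] at hc1
    obtain ⟨a, ha, hac2, -, hamem⟩ := pv_wit2 hpc hc1.1
    rw [ha]
    exact hmem2.2 ⟨hamem, hac2⟩
  · intro p hp
    obtain ⟨hpc, hc2⟩ := hmem2.1 hp
    rw [pvC2, Bool.and_eq_true] at hc2
    obtain ⟨a, ha, hac1, -, hamem⟩ := pv_wit1 hpc hc2.1
    rw [ha]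
    exact hmem1.2 ⟨hamem, hac1⟩
  · intro p hp
    obtain ⟨hpc, hc1⟩ := hmem1.1 hp
    rw [pvC1, Bool.and_eq_true] at hc1
    obtain ⟨a, ha, -, hconna, -⟩ := pv_wit2 hpc hc1.1
    have hLa : pvLandP g a := by
      have hpred := List.find?_some ha
      rw [Bool.and_eq_true] at hpred
      exact pv_isT_land (List.mem_of_find?_eq_some ha) hpred.1
    rw [ha]
    simp only [Option.getD_some]
    rw [← pv_find_class_congr hQ1land hLa hconna, beq_iff_eq.1 hc1.2]
    rfl
  · intro p hp
    obtain ⟨hpc, hc2⟩ := hmem2.1 hp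
    rw [pvC2, Bool.and_eq_true] at hc2
    obtain ⟨a, ha, -, hconna, -⟩ := pv_wit1 hpc hc2.1
    have hLa : pvLandP g a := by
      have hpred := List.find?_some ha
      rw [Bool.and_eq_true] at hpred
      exact hQ1land a (List.mem_of_find?_eq_some ha) hpred.1
    rw [ha]
    simp only [Option.getD_some]
    rw [← pv_find_class_congr hTland hLa hconna, beq_iff_eq.1 hc2.2]
    rfl

-- ---- evaluating the two ports ----

def pvAStep (g : List (List String)) (fuel : Nat) (st : Int × PySem.Set (Int × Int))
    (p : Int × Int) : Int × PySem.Set (Int × Int) :=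
  if (pvGetCell g p.1 p.2 = "1" ∨ pvGetCell g p.1 p.2 = "T") ∧ p ∉ st.2 then
    (if (pvDfsA g (pvRowsI g) (pvColsI g) fuel p.1 p.2 st.2).1 then st.1 + 1 else st.1,
     (pvDfsA g (pvRowsI g) (pvColsI g) fuel p.1 p.2 st.2).2)
  else st

def pvAInv (g : List (List String)) (pre : List (Int × Int))
    (st : Int × PySem.Set (Int × Int)) : Prop :=
  (∀ x, x ∈ st.2 ↔ ∃ q ∈ pre, pvIsStart g q = true ∧ pvLandP g q ∧ pvConn g q x) ∧
  st.1 = ((pre.countP (pvC1 g) : Nat) : Int)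

theorem pv_lex_asym : ∀ a b : Int × Int, pvLex a b → ¬ pvLex b a := by
  intro a b h1 h2
  rcases h1 with h1 | h1 <;> rcases h2 with h2 | h2 <;> omega

theorem pvAStep_inv {g : List (List String)} {pre suf : List (Int × Int)} {p : Int × Int}
    {st : Int × PySem.Set (Int × Int)}
    (hcells : pvCells g = pre ++ p :: suf) (hinv : pvAInv g pre st) :
    pvAInv g (pre ++ [p]) (pvAStep g ((pvRowsI g).toNat * (pvColsI g).toNat + 1) st p) := by
  obtain ⟨cnt, V⟩ := st
  obtain ⟨hV, hcnt⟩ := hinv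
  dsimp only at hV hcnt
  have hpmem : p ∈ pvCells g := by
    rw [hcells]; exact List.mem_append_right _ List.mem_cons_self
  have hclosed : ∀ x y, x ∈ V → pvStep g x y → y ∈ V := by
    intro x y hx hs
    obtain ⟨q, hq, hqs, hqL, hqc⟩ := (hV x).1 hx
    exact (hV y).2 ⟨q, hq, hqs, hqL, hqc.tail hs⟩
  have hprein : ∀ q, q ∈ pre ↔ q ∈ pvCells g ∧ pvLex q p := by
    intro q
    have h := pv_mem_pre_iff (lt := pvLex) (pre := pre) (suf := suf) (p := p) (q := q)
      (by rw [← hcells]; exact pv_pairwise_cells g) pv_lex_asym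
    rw [← hcells] at h
    exact h
  have hstart_iff : (pvGetCell g p.1 p.2 = "1" ∨ pvGetCell g p.1 p.2 = "T") ↔
      pvIsStart g p = true := by
    rw [pvIsStart, Bool.or_eq_true, beq_iff_eq, beq_iff_eq]
  rw [pvAStep]
  by_cases hcond : (pvGetCell g p.1 p.2 = "1" ∨ pvGetCell g p.1 p.2 = "T") ∧ p ∉ V
  · rw [if_pos hcond]
    have hSt : pvIsStart g p = true := hstart_iff.1 hcond.1
    have hLp : pvLandP g p := pv_isStart_land hpmem hSt
    have hfuel : pvNotVisCount g V < (pvRowsI g).toNat * (pvColsI g).toNat + 1 := by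
      have := pv_cnt_le_total g V; omega
    obtain ⟨hVmem', hBiff⟩ :=
      pvDfsA_spec g ((pvRowsI g).toNat * (pvColsI g).toNat + 1) p.1 p.2 V hfuel
    rw [Prod.mk.eta] at hVmem' hBiff
    have hreach : ∀ x, pvReach g V p x ↔ pvLandP g p ∧ pvConn g p x :=
      fun x => pv_reach_closed_iff hclosed hcond.2
    constructor
    · intro x
      dsimp only
      rw [hVmem' x]
      constructor
      · rintro (hx | hx)
        · obtain ⟨q, hq, h3, h4, h5⟩ := (hV x).1 hx
          exact ⟨q, List.mem_append_left _ hq, h3, h4, h5⟩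
        · exact ⟨p, List.mem_append_right _ List.mem_cons_self, hSt, hLp, ((hreach x).1 hx).2⟩
      · rintro ⟨q, hq, h3, h4, h5⟩
        rcases List.mem_append.1 hq with hq | hq
        · exact Or.inl ((hV x).2 ⟨q, hq, h3, h4, h5⟩)
        · rcases List.mem_cons.1 hq with rfl | hq0
          · exact Or.inr ((hreach x).2 ⟨hLp, h5⟩)
          · cases hq0
    · dsimp only
      by_cases hB : (pvDfsA g (pvRowsI g) (pvColsI g)
          ((pvRowsI g).toNat * (pvColsI g).toNat + 1) p.1 p.2 V).1 = true
      · rw [if_pos hB]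
        have hHasT : pvHasT g p = true := by
          rw [pv_hasT_iff hLp]
          obtain ⟨x, hx1, hx2⟩ := hBiff.1 hB
          exact ⟨x, ((hreach x).1 hx1).2, hx2⟩
        have hC1 : pvC1 g p = true := by
          rw [pvC1, Bool.and_eq_true, pvQ1, Bool.and_eq_true]
          refine ⟨⟨hSt, hHasT⟩, ?_⟩
          rw [beq_iff_eq]
          have hfp : (pvQ1 g p && pvRelB g p p) = true := by
            rw [Bool.and_eq_true, pvQ1, Bool.and_eq_true]
            exact ⟨⟨hSt, hHasT⟩, pv_relB_self hLp⟩
          rw [pv_find?_first pv_lex_asym (pv_pairwise_cells g) hpmem _ hfp]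
          intro q hq hlex
          cases hpq : (pvQ1 g q && pvRelB g q p) with
          | false => rfl
          | true =>
              exfalso
              rw [Bool.and_eq_true, pvQ1, Bool.and_eq_true] at hpq
              obtain ⟨⟨hq1, hq2⟩, hq3⟩ := hpq
              have hLq := pv_isStart_land hq hq1
              have hqp : pvConn g q p := (pv_relB_iff hLq).1 hq3
              exact hcond.2 ((hV p).2 ⟨q, (hprein q).2 ⟨hq, hlex⟩, hq1, hLq, hqp⟩)
        rw [hcnt, List.countP_append, List.countP_cons, List.countP_nil, hC1]
        simp
      · rw [if_neg hB]
        have hHasT : pvHasT g p = false := by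
          cases h : pvHasT g p with
          | false => rfl
          | true =>
              exfalso
              apply hB
              rw [hBiff]
              obtain ⟨x, hx1, hx2⟩ := (pv_hasT_iff hLp).1 h
              exact ⟨x, (hreach x).2 ⟨hLp, hx1⟩, hx2⟩
        have hC1 : pvC1 g p = false := by
          rw [pvC1, pvQ1, hHasT, Bool.and_false, Bool.false_and]
        rw [hcnt, List.countP_append, List.countP_cons, List.countP_nil, hC1]
        simp
  · rw [if_neg hcond]
    have hC1 : pvC1 g p = false := by
      cases hc : pvC1 g p with
      | false => rfl
      | true =>
          exfalso
          rw [pvC1, Bool.and_eq_true, beq_iff_eq] at hc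
          obtain ⟨hq1full, hfind⟩ := hc
          have hq1 := hq1full
          rw [pvQ1, Bool.and_eq_true] at hq1
          have hLp := pv_isStart_land hpmem hq1.1
          rcases not_and_or.1 hcond with hns | hpv
          · exact hns (hstart_iff.2 hq1.1)
          · have hpV : p ∈ V := not_not.1 hpv
            obtain ⟨q, hqpre, hqs, hqL, hqc⟩ := (hV p).1 hpV
            have hqcells := (hprein q).1 hqpre
            have hhq : pvHasT g q = true := by
              rw [pv_hasT_iff hqL]
              obtain ⟨x, hx1, hx2⟩ := (pv_hasT_iff hLp).1 hq1.2
              exact ⟨x, hqc.trans hx1, hx2⟩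
            have hpred : (pvQ1 g q && pvRelB g q p) = true := by
              rw [Bool.and_eq_true, pvQ1, Bool.and_eq_true]
              exact ⟨⟨hqs, hhq⟩, (pv_relB_iff hqL).2 hqc⟩
            have hfp : (pvQ1 g p && pvRelB g p p) = true := by
              rw [Bool.and_eq_true]
              exact ⟨hq1full, pv_relB_self hLp⟩
            have hfalse := (pv_find?_first pv_lex_asym (pv_pairwise_cells g) hpmem _ hfp).1
              hfind q hqcells.1 hqcells.2
            rw [hfalse] at hpred
            cases hpred
    constructor
    · intro x
      constructor
      · intro hx
        obtain ⟨q, hq, h3, h4, h5⟩ := (hV x).1 hx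
        exact ⟨q, List.mem_append_left _ hq, h3, h4, h5⟩
      · rintro ⟨q, hq, h3, h4, h5⟩
        rcases List.mem_append.1 hq with hq | hq
        · exact (hV x).2 ⟨q, hq, h3, h4, h5⟩
        · rcases List.mem_cons.1 hq with rfl | hq0
          · have hpV : q ∈ V := by
              rcases not_and_or.1 hcond with hns | hpv
              · exact absurd (hstart_iff.2 h3) hns
              · exact not_not.1 hpv
            obtain ⟨q', hq'pre, h3', h4', h5'⟩ := (hV q).1 hpV
            exact (hV x).2 ⟨q', hq'pre, h3', h4', h5'.trans h5⟩
          · cases hq0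
    · rw [hcnt, List.countP_append, List.countP_cons, List.countP_nil, hC1]
      simp

theorem pvA_fold {g : List (List String)} :
    ∀ (suf pre : List (Int × Int)) (st : Int × PySem.Set (Int × Int)),
      pvCells g = pre ++ suf → pvAInv g pre st →
      pvAInv g (pre ++ suf)
        (suf.foldl (pvAStep g ((pvRowsI g).toNat * (pvColsI g).toNat + 1)) st) := by
  intro suf
  induction suf with
  | nil => intro pre st h hinv; simpa using hinv
  | cons p t ih =>
      intro pre st h hinv
      rw [List.foldl_cons]
      have h2 : pvCells g = (pre ++ [p]) ++ t := by rw [h]; simp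
      have hres := ih (pre ++ [p]) _ h2 (pvAStep_inv h hinv)
      rw [show pre ++ p :: t = (pre ++ [p]) ++ t by simp]
      exact hres

theorem pv_c2_cond {g : List (List String)} {p : Int × Int} (hp : p ∈ pvCells g) :
    (pvGetCell g p.1 p.2 = "T" ∧ ∀ q ∈ pvComponent g (pvRowsI g) (pvColsI g) p.1 p.2,
        pvGetCell g q.1 q.2 = "T" → (p.1 < q.1 ∨ (p.1 = q.1 ∧ p.2 ≤ q.2))) ↔
      pvC2 g p = true := by
  constructor
  · rintro ⟨hT, hall⟩
    have hTb : pvIsT g p = true := by rw [pvIsT, beq_iff_eq]; exact hT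
    have hLp := pv_isT_land hp hTb
    rw [pvC2, Bool.and_eq_true]
    refine ⟨hTb, ?_⟩
    rw [beq_iff_eq]
    have hfp : (pvIsT g p && pvRelB g p p) = true := by
      rw [Bool.and_eq_true]
      exact ⟨hTb, pv_relB_self hLp⟩
    rw [pv_find?_first pv_lex_asym (pv_pairwise_cells g) hp _ hfp]
    intro q hq hlex
    cases hpq : (pvIsT g q && pvRelB g q p) with
    | false => rfl
    | true =>
        exfalso
        rw [Bool.and_eq_true] at hpq
        have hLq := pv_isT_land hq hpq.1
        have hqp : pvConn g q p := (pv_relB_iff hLq).1 hpq.2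
        have hqcomp : q ∈ pvComponent g (pvRowsI g) (pvColsI g) p.1 p.2 :=
          (pvComponent_spec hLp q).2 (pv_conn_symm hLq hqp)
        have := hall q hqcomp (by
          have hh := hpq.1
          rw [pvIsT, beq_iff_eq] at hh
          exact hh)
        rcases hlex with h | h <;> omega
  · intro hc2
    rw [pvC2, Bool.and_eq_true, beq_iff_eq] at hc2
    obtain ⟨hTb, hfind⟩ := hc2
    have hLp := pv_isT_land hp hTb
    refine ⟨by rw [pvIsT, beq_iff_eq] at hTb; exact hTb, ?_⟩
    intro q hq hqT
    have hconn : pvConn g p q := (pvComponent_spec hLp q).1 hq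
    have hLq := pv_land_of_conn hLp hconn
    have hqcells := pv_land_mem_cells hLq
    by_contra hcon
    have hlex : pvLex q p := by
      rw [pvLex]
      push_neg at hcon
      rcases lt_trichotomy q.1 p.1 with h | h | h
      · exact Or.inl h
      · right; refine ⟨h, ?_⟩; omega
      · exfalso; omega
    have hfp : (pvIsT g p && pvRelB g p p) = true := by
      rw [Bool.and_eq_true]
      exact ⟨hTb, pv_relB_self hLp⟩
    have hfalse := (pv_find?_first pv_lex_asym (pv_pairwise_cells g) hp _ hfp).1
      hfind q hqcells hlex
    have hpred : (pvIsT g q && pvRelB g q p) = true := by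
      rw [Bool.and_eq_true]
      exact ⟨by rw [pvIsT, beq_iff_eq]; exact hqT, (pv_relB_iff hLq).2 (pv_conn_symm hLp hconn)⟩
    rw [hfalse] at hpred
    cases hpred

theorem pvA_eq_countC1 {g : List (List String)} (hg : g ≠ []) :
    numIslandsWithTreasure g = ((pvCells g).countP (pvC1 g) : Int) := by
  rw [numIslandsWithTreasure, if_neg hg]
  have hinit : pvAInv g [] ((0 : Int), (PySem.Set.empty : PySem.Set (Int × Int))) := by
    constructor
    · intro x
      constructor
      · intro hx; cases hx
      · rintro ⟨q, hq, -⟩; cases hq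
    · rfl
  have hfold := pvA_fold (pvCells g) [] ((0 : Int), (PySem.Set.empty : PySem.Set (Int × Int)))
    (by simp) hinit
  rw [List.nil_append] at hfold
  have hflat : ((PySem.List.pyRange 0 (pvRowsI g) 1).foldl (fun st r =>
      (PySem.List.pyRange 0 (pvColsI g) 1).foldl (fun st c =>
        pvAStep g ((pvRowsI g).toNat * (pvColsI g).toNat + 1) st (r, c)) st)
      ((0 : Int), (PySem.Set.empty : PySem.Set (Int × Int)))) =
      ((pvCells g).foldl (pvAStep g ((pvRowsI g).toNat * (pvColsI g).toNat + 1))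
        ((0 : Int), (PySem.Set.empty : PySem.Set (Int × Int)))) := by
    rw [pvCells, List.foldl_flatMap]
    apply PySem.List.foldl_congr_mem
    intro acc r hr
    rw [List.foldl_map]
  calc ((PySem.List.pyRange 0 (↑g.length) 1).foldl (fun st r =>
      (PySem.List.pyRange 0 (↑(g.headD []).length) 1).foldl (fun st c =>
        if (pvGetCell g r c = "1" ∨ pvGetCell g r c = "T") ∧ (r, c) ∉ st.2 then
          ((if (pvDfsA g (↑g.length) (↑(g.headD []).length)
              ((↑g.length : Int).toNat * ((↑(g.headD []).length : Int)).toNat + 1) r c st.2).1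
            then st.1 + 1 else st.1),
           (pvDfsA g (↑g.length) (↑(g.headD []).length)
              ((↑g.length : Int).toNat * ((↑(g.headD []).length : Int)).toNat + 1) r c st.2).2)
        else st) st)
      ((0 : Int), (PySem.Set.empty : PySem.Set (Int × Int)))).1
      = ((pvCells g).foldl (pvAStep g ((pvRowsI g).toNat * (pvColsI g).toNat + 1))
        ((0 : Int), (PySem.Set.empty : PySem.Set (Int × Int)))).1 := by rw [← hflat]; rfl
    _ = ((pvCells g).countP (pvC1 g) : Int) := hfold.2

theorem pvB_eq_countC2 {g : List (List String)} (hg : g ≠ []) :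
    numIslandsWithTreasure_alt g = ((pvCells g).countP (pvC2 g) : Int) := by
  rw [numIslandsWithTreasure_alt, if_neg hg]
  show ((PySem.List.pyRange 0 (↑g.length) 1).foldl (fun cnt r =>
      (PySem.List.pyRange 0 (↑(g.headD []).length) 1).foldl (fun cnt c =>
        if pvGetCell g r c = "T" ∧ (∀ q ∈ pvComponent g (↑g.length) (↑(g.headD []).length) r c,
            pvGetCell g q.1 q.2 = "T" → (r < q.1 ∨ (r = q.1 ∧ c ≤ q.2)))
          then cnt + 1 else cnt) cnt) 0) = ((pvCells g).countP (pvC2 g) : Int)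
  have hflat : ((pvCells g).foldl (fun (cnt : Int) (p : Int × Int) =>
      if pvGetCell g p.1 p.2 = "T" ∧ (∀ q ∈ pvComponent g (pvRowsI g) (pvColsI g) p.1 p.2,
          pvGetCell g q.1 q.2 = "T" → (p.1 < q.1 ∨ (p.1 = q.1 ∧ p.2 ≤ q.2)))
        then cnt + 1 else cnt) 0) =
      ((PySem.List.pyRange 0 (↑g.length) 1).foldl (fun cnt r =>
        (PySem.List.pyRange 0 (↑(g.headD []).length) 1).foldl (fun cnt c =>
          if pvGetCell g r c = "T" ∧ (∀ q ∈ pvComponent g (↑g.length) (↑(g.headD []).length) r c,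
              pvGetCell g q.1 q.2 = "T" → (r < q.1 ∨ (r = q.1 ∧ c ≤ q.2)))
            then cnt + 1 else cnt) cnt) 0) := by
    rw [pvCells, List.foldl_flatMap]
    apply PySem.List.foldl_congr_mem
    intro acc r hr
    rw [List.foldl_map]
    apply PySem.List.foldl_congr_mem
    intro acc2 c hc
    rfl
  rw [← hflat]
  have hcond : ∀ (acc : Int), ∀ p ∈ pvCells g,
      (if pvGetCell g p.1 p.2 = "T" ∧ (∀ q ∈ pvComponent g (pvRowsI g) (pvColsI g) p.1 p.2,
          pvGetCell g q.1 q.2 = "T" → (p.1 < q.1 ∨ (p.1 = q.1 ∧ p.2 ≤ q.2)))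
        then acc + 1 else acc) =
      (if pvC2 g p = true then acc + 1 else acc) := by
    intro acc p hp
    by_cases h : pvC2 g p = true
    · rw [if_pos ((pv_c2_cond hp).2 h), if_pos h]
    · rw [if_neg (fun hc => h ((pv_c2_cond hp).1 hc)), if_neg h]
  rw [PySem.List.foldl_congr_mem _ _ _ _ hcond]
  rw [PySem.List.foldl_count_if (fun p => pvC2 g p) (pvCells g) 0]
  simp

-- ===== VERDICT (by name: the statement is the Claim_ definition above) =====
theorem numIslandsWithTreasure_spec : Claim_equal_numIslandsWithTreasure := by
  intro grid _ _
  unfold Spec_numIslandsWithTreasure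
  by_cases hg : grid = []
  · subst hg; rfl
  · rw [pvA_eq_countC1 hg, pvB_eq_countC2 hg, pv_countP_bij]
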